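-- pv_equiv track=rewrite | github.com/francoisissartel-cloud/vectora-inbox | test_trademark_simple.py | _detect_entities_in_text
-- ===== SOURCE A (Python) =====
-- def _detect_entities_in_text(text, entities):
--     if not text or not entities:
--         return 0
--
--     text_lower = text.lower()
--     matches = 0
--
--     for entity in entities:
--         if isinstance(entity, str) and entity.lower() in text_lower:
--             matches += 1
--
--     return matches
-- ===== SOURCE B (Python) =====
-- def _detect_entities_in_text(text, entities):
--     if not text or not entities:
--         return 0
--     text_lower = text.lower()
--     # Text-major scan: lowercase the entities once, then walk every position of
--     # the text, prefix-matching each lowered entity there, collecting the set of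
--     # entity strings that occur somewhere; finally count list elements whose
--     # lowercased form was seen.
--     lowered = [e.lower() for e in entities if isinstance(e, str)]
--     found = set()
--     for i in range(len(text_lower)):
--         for el in lowered:
--             if text_lower.startswith(el, i):
--                 found.add(el)
--     return sum(1 for e in entities if isinstance(e, str) and e.lower() in found)
-- ===== Notes on version B (the rewrite author's own statement) =====
-- stated objective: alternative
-- what changed: B inverts the traversal: instead of one built-in substring scan per entity (entity-major), it lowercases the entities once and walks the text positions, prefix-matching every lowered entity at each position to build the set of occurring entities, then counts list elements whose lowered form is in that set.
import Mathlib
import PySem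

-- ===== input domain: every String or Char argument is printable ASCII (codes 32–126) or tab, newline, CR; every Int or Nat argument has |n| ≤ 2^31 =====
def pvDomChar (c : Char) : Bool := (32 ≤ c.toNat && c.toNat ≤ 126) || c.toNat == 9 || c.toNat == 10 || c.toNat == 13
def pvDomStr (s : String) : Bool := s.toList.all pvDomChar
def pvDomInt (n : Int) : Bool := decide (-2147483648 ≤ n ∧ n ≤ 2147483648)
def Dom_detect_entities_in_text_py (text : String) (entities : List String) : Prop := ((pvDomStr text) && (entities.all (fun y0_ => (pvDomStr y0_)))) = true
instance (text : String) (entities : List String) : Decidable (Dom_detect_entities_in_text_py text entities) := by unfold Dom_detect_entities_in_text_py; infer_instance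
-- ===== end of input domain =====

-- B inverts the traversal: a text-major position scan that prefix-matches each lowercased entity and collects the set of occurring ones, then counts list elements in that set (alternative decomposition; same result).


-- ===== PORT A =====
def detect_entities_in_text_py (text : String) (entities : List String) : Int :=
  if text = "" ∨ entities = [] then 0
  else
    let text_lower := PySem.Str.lower text
    entities.foldl
      (fun m entity =>
        if PySem.Str.isIn (PySem.Str.lower entity) text_lower then m + 1 else m)
      0

-- ===== PORT B =====
def detect_entities_in_text_py_alt (text : String) (entities : List String) : Int :=
  if text = "" ∨ entities = [] then 0
  else
    let text_lower := PySem.Str.lower text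
    let lowered := entities.map (fun e => PySem.Str.lower e)
    let found : PySem.Set String :=
      (PySem.List.pyRange 0 (PySem.Str.len text_lower) 1).foldl
        (fun fs i =>
          lowered.foldl
            (fun fs el =>
              -- text_lower.startswith(el, i): hand-port, exact for 0 ≤ i ≤ len(text_lower)
              -- (a prefix match against the suffix starting at i)
              if PySem.Chars.startswith (PySem.List.slice text_lower.toList (some i) none) el.toList
              then PySem.Set.add fs el else fs)
            fs)
        PySem.Set.empty
    entities.foldl
      (fun c e => if PySem.Str.lower e ∈ found then c + 1 else c) 0

-- ===== PRECONDITION & SPEC =====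
def Spec_detect_entities_in_text_py (text : String) (entities : List String) (out : Int) : Prop := out = detect_entities_in_text_py_alt text entities
instance (text : String) (entities : List String) (out : Int) : Decidable (Spec_detect_entities_in_text_py text entities out) := by unfold Spec_detect_entities_in_text_py; infer_instance

-- ===== CLAIM (what is proved, stated in full; the proofs are below) =====
def Claim_equal_detect_entities_in_text_py : Prop := ∀ (text : String) (entities : List String), Dom_detect_entities_in_text_py text entities → Spec_detect_entities_in_text_py text entities (detect_entities_in_text_py text entities)

-- ===== LEMMAS AND PROOFS =====

-- membership in a fold that conditionally adds g a to a PySem.Set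
theorem pv_mem_foldl_add {α β : Type} [BEq β] [LawfulBEq β] (q : α → Bool) (g : α → β) :
    ∀ (l : List α) (fs : PySem.Set β) (x : β),
      x ∈ l.foldl (fun fs a => if q a then PySem.Set.add fs (g a) else fs) fs ↔
        x ∈ fs ∨ ∃ a ∈ l, q a ∧ g a = x := by
  intro l
  induction l with
  | nil => intro fs x; simp
  | cons a t ih =>
    intro fs x
    simp only [List.foldl_cons]
    by_cases hq : q a
    · rw [hq, if_pos rfl, ih]
      constructor
      · rintro (hm | h)
        · rcases (PySem.Set.mem_add fs (g a) x).mp hm with hm | rfl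
          · exact Or.inl hm
          · exact Or.inr ⟨a, List.mem_cons_self, hq, rfl⟩
        · rcases h with ⟨b, hb, hqb, hgb⟩
          exact Or.inr ⟨b, List.mem_cons_of_mem _ hb, hqb, hgb⟩
      · rintro (hm | ⟨b, hb, hqb, hgb⟩)
        · exact Or.inl ((PySem.Set.mem_add fs (g a) x).mpr (Or.inl hm))
        · rcases List.mem_cons.mp hb with rfl | hbt
          · exact Or.inl ((PySem.Set.mem_add fs (g b) x).mpr (Or.inr hgb.symm))
          · exact Or.inr ⟨b, hbt, hqb, hgb⟩
    · simp only [hq, Bool.false_eq_true, ih]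
      constructor
      · rintro (hm | ⟨b, hb, hqb, hgb⟩)
        · exact Or.inl hm
        · exact Or.inr ⟨b, List.mem_cons_of_mem _ hb, hqb, hgb⟩
      · rintro (hm | ⟨b, hb, hqb, hgb⟩)
        · exact Or.inl hm
        · rcases List.mem_cons.mp hb with rfl | hbt
          · exact absurd hqb hq
          · exact Or.inr ⟨b, hbt, hqb, hgb⟩

-- membership in a fold whose step satisfies a pointwise membership law
theorem pv_mem_foldl_gen {α β : Type} [BEq β] (F : PySem.Set β → α → PySem.Set β)
    (P : α → β → Prop)
    (hF : ∀ fs a x, x ∈ F fs a ↔ x ∈ fs ∨ P a x) :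
    ∀ (l : List α) (init : PySem.Set β) (x : β),
      x ∈ l.foldl F init ↔ x ∈ init ∨ ∃ a ∈ l, P a x := by
  intro l
  induction l with
  | nil => intro init x; simp
  | cons a t ih =>
    intro init x
    simp only [List.foldl_cons, ih, hF]
    constructor
    · rintro ((hm | hp) | ⟨b, hb, hpb⟩)
      · exact Or.inl hm
      · exact Or.inr ⟨a, List.mem_cons_self, hp⟩
      · exact Or.inr ⟨b, List.mem_cons_of_mem _ hb, hpb⟩
    · rintro (hm | ⟨b, hb, hpb⟩)
      · exact Or.inl (Or.inl hm)
      · rcases List.mem_cons.mp hb with rfl | hbt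
        · exact Or.inl (Or.inr hpb)
        · exact Or.inr ⟨b, hbt, hpb⟩

-- the scanned set contains exactly the lowered entities that occur in the text
theorem pv_found_iff (tl : String) (entities : List String) (x : String)
    (hlen : 0 < tl.toList.length) :
    x ∈ (PySem.List.pyRange 0 (PySem.Str.len tl) 1).foldl
        (fun fs i =>
          (entities.map (fun e => PySem.Str.lower e)).foldl
            (fun fs el =>
              if PySem.Chars.startswith (PySem.List.slice tl.toList (some i) none) el.toList
              then PySem.Set.add fs el else fs)
            fs)
        PySem.Set.empty
      ↔ ∃ e ∈ entities, PySem.Str.lower e = x ∧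
          PySem.Str.isIn (PySem.Str.lower e) tl = true := by
  rw [pv_mem_foldl_gen _
      (fun i y => ∃ el ∈ entities.map (fun e => PySem.Str.lower e),
        PySem.Chars.startswith (PySem.List.slice tl.toList (some i) none) el.toList = true ∧
        el = y)
      (fun fs i y => by
        rw [pv_mem_foldl_add
          (fun el => PySem.Chars.startswith (PySem.List.slice tl.toList (some i) none) el.toList)
          (fun el => el) (entities.map (fun e => PySem.Str.lower e)) fs y])]
  simp only [PySem.Set.empty, List.not_mem_nil, false_or, List.mem_map]
  constructor
  · rintro ⟨i, hi, el, ⟨e, he, rfl⟩, hsw, hx⟩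
    refine ⟨e, he, hx, ?_⟩
    rw [PySem.Str.isIn_eq, PySem.Chars.isIn_iff_infix]
    have hi' := (PySem.List.mem_pyRange_one).mp hi
    have h0 : (0 : Int) ≤ i := hi'.1
    rw [PySem.Chars.startswith_iff, PySem.List.slice_from _ h0] at hsw
    exact (PySem.Chars.isIn_iff_infix _ _).mp
      ((PySem.Chars.exists_prefix_drop_iff_isIn _ _).mp ⟨i.toNat, hsw⟩)
  · rintro ⟨e, he, hx, hin⟩
    rw [PySem.Str.isIn_eq] at hin
    obtain ⟨j, hj⟩ := (PySem.Chars.exists_prefix_drop_iff_isIn (PySem.Str.lower e).toList tl.toList).mpr hin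
    by_cases hjl : j < tl.toList.length
    · refine ⟨(j : Int), ?_, PySem.Str.lower e, ⟨e, he, rfl⟩, ?_, hx⟩
      · rw [PySem.List.mem_pyRange_one]
        constructor
        · exact Int.natCast_nonneg j
        · have := PySem.Str.len_eq tl
          omega
      · rw [PySem.Chars.startswith_iff, PySem.List.slice_from_natCast]
        exact hj
    · -- j past the end: the pattern is empty, matched at position 0
      have hnil : tl.toList.drop j = [] := List.drop_eq_nil_of_le (by omega)
      rw [hnil, List.prefix_nil] at hj
      refine ⟨0, ?_, PySem.Str.lower e, ⟨e, he, rfl⟩, ?_, hx⟩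
      · rw [PySem.List.mem_pyRange_one]
        have := PySem.Str.len_eq tl
        omega
      · rw [PySem.Chars.startswith_iff, hj]
        simp [PySem.List.slice_from]

-- ===== VERDICT (by name: the statement is the Claim_ definition above) =====
theorem detect_entities_in_text_py_spec : Claim_equal_detect_entities_in_text_py := by
  intro text entities _
  unfold Spec_detect_entities_in_text_py detect_entities_in_text_py detect_entities_in_text_py_alt
  by_cases hg : text = "" ∨ entities = []
  · simp [hg]
  · simp only [hg, if_false]
    have htext : text ≠ "" := fun h => hg (Or.inl h)
    have hlen : 0 < (PySem.Str.lower text).toList.length := by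
      rw [PySem.Str.toList_lower]
      have hne : text.toList ≠ [] := by simpa [String.toList_eq_nil_iff] using htext
      have : (PySem.Chars.lower text.toList).length = text.toList.length := by
        simp [PySem.Chars.lower]
      rw [this]
      exact List.length_pos_of_ne_nil hne
    apply PySem.List.foldl_congr_mem
    intro acc e he
    by_cases hin : PySem.Str.isIn (PySem.Str.lower e) (PySem.Str.lower text) = true
    · rw [if_pos hin,
        if_pos ((pv_found_iff (PySem.Str.lower text) entities (PySem.Str.lower e) hlen).mpr
          ⟨e, he, rfl, hin⟩)]
    · rw [if_neg hin, if_neg]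
      intro hmem
      obtain ⟨e', _, hx, hin'⟩ :=
        (pv_found_iff (PySem.Str.lower text) entities (PySem.Str.lower e) hlen).mp hmem
      exact hin (hx ▸ hin')
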